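-- pv_equiv track=rewrite | github.com/andylehti/SHEP32 | benchmark.py | fDecimal
-- ===== SOURCE A (Python) =====
-- import math, os, sys, time, string, hashlib, base64
--
-- _GCHAR_BASE = ''.join([x for x in string.printable[:90] if x not in '/\\`"\',_!#$%&()* +-=']) + '&()*$%/\\`"\',_!#'
--
-- def gChar(c): return _GCHAR_BASE[:c]
--
-- def fDecimal(d, b):
--     c, n, r = gChar(b), 1, d
--     bn = b
--     while r >= bn: r -= bn; n += 1; bn *= b
--     if n == 0: return ""
--     out = []
--     for _ in range(n):
--         out.append(c[r % b])
--         r //= b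
--     return ''.join(reversed(out)).zfill(n)
-- ===== SOURCE B (Python) =====
-- import string
--
-- _GCHAR_BASE = ''.join([x for x in string.printable[:90] if x not in '/\\`"\',_!#$%&()* +-=']) + '&()*$%/\\`"\',_!#'
--
-- def gChar(c): return _GCHAR_BASE[:c]
--
-- def fDecimal(d, b):
--     # bijective base-b numeral of d+1: one divmod loop, digits built LSB-first
--     c = gChar(b)
--     digits = []
--     m = d + 1
--     while m > 0:
--         m, r = divmod(m - 1, b)
--         digits.append(c[r])
--     return ''.join(reversed(digits))
-- ===== Notes on version B (the rewrite author's own statement) =====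
-- stated objective: simpler
-- what changed: A finds the digit count with a subtractive while-loop and then converts the residual by repeated division plus a redundant zfill; B recognises the output as the bijective base-b numeral of d+1 and produces it with a single divmod(m-1,b) loop.
-- intended difference: For negative d, A returns the single character c[d % b] (leftover state of a loop that never ran) while B returns the empty string, the natural numeral for a value with no digits. — e.g. on fDecimal(-1, 2): A returns "1", B returns ""
-- outside the precondition, e.g. on fDecimal(0, -2): A returns '_0', B returns '0'; on fDecimal(100, 100): A returns '00', B returns '00'
import Mathlib
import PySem

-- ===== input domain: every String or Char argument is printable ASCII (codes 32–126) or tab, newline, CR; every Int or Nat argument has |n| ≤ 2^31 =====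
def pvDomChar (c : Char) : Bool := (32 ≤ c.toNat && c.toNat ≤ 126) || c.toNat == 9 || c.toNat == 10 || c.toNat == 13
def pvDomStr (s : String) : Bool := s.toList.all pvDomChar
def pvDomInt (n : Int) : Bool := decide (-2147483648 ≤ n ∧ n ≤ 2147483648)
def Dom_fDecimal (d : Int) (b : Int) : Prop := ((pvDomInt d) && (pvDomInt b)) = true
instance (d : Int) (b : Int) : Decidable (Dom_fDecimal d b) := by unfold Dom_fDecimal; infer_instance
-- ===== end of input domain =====

-- B replaces A's length-finding subtractive loop + residual base conversion + zfill by one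
-- divmod loop producing the bijective base-b numeral of d+1 (objective: simpler; return value only).

-- ===== PORT A =====
-- _GCHAR_BASE: the 87-character alphabet the Python module builds at import time
def pvBase : List Char :=
  "0123456789abcdefghijklmnopqrstuvwxyzABCDEFGHIJKLMNOPQRSTUVWXYZ.:;<>?@[]^&()*$%/\\`\"',_!#".toList

-- gChar(c) = _GCHAR_BASE[:c]
def pvGChar (c : Int) : List Char := PySem.List.slice pvBase none (some c)

-- while r >= bn: r -= bn; n += 1; bn *= b   (fuel only makes the loop total; on every
-- admitted input d.toNat+1 iterations are more than the loop performs)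
def pvLoopA (b : Int) : Nat → Int → Int → Int → Int × Int
  | 0, r, n, _ => (r, n)
  | f + 1, r, n, bn => if bn ≤ r then pvLoopA b f (r - bn) (n + 1) (bn * b) else (r, n)

-- for _ in range(n): out.append(c[r % b]); r //= b   (c[i] is in range on admitted inputs;
-- the .getD ' ' default is never reached there)
def pvDigitsA (c : List Char) (b : Int) : Nat → Int → List Char
  | 0, _ => []
  | k + 1, r =>
      ((PySem.List.pyGet? c (PySem.Int.mod r b)).getD ' ')
        :: pvDigitsA c b k (PySem.Int.floordiv r b)

def fDecimal (d : Int) (b : Int) : String :=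
  let c := pvGChar b
  let p := pvLoopA b (d.toNat + 1) d 1 b
  if p.2 == 0 then ""
  else String.ofList (PySem.Chars.zfill ((pvDigitsA c b p.2.toNat p.1).reverse) p.2)

-- ===== PORT B =====
-- while m > 0: m, r = divmod(m - 1, b); digits.append(c[r])   (fuel (d+2).toNat is enough
-- on every admitted input; .getD ' ' never reached there)
def pvLoopB (c : List Char) (b : Int) : Nat → Int → List Char
  | 0, _ => []
  | f + 1, m =>
      if 0 < m then
        ((PySem.List.pyGet? c (PySem.Int.mod (m - 1) b)).getD ' ')
          :: pvLoopB c b f (PySem.Int.floordiv (m - 1) b)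
      else []

def fDecimal_alt (d : Int) (b : Int) : String :=
  let c := pvGChar b
  String.ofList ((pvLoopB c b (d + 2).toNat (d + 1)).reverse)

-- ===== PRECONDITION & SPEC =====
-- Pre_ excludes b ≤ 0, where A loops forever, raises ZeroDivisionError or indexes the
-- alphabet from the end, and the inputs with b > 87 and d ≥ 87, where gChar's silent
-- truncation to its 87 symbols makes A raise IndexError whenever a digit reaches the cut
-- (for b > 87 with 0 ≤ d < 87 the numeral is the single in-range digit d, so A returns;
-- for b > 87 with d < 0 the leftover index d % b = b + d also reaches past the cut).
def Pre_fDecimal (d : Int) (b : Int) : Prop := 1 ≤ b ∧ (b ≤ 87 ∨ (0 ≤ d ∧ d < 87))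
instance (d : Int) (b : Int) : Decidable (Pre_fDecimal d b) := by unfold Pre_fDecimal; infer_instance
def pvWitness_fDecimal : Int × Int := (5, 2)

-- For negative d A returns the single character c[d % b] — leftover state of a loop that never
-- ran — while B returns the empty string, the natural numeral for a value with no digits.
def D_fDecimal (d : Int) (b : Int) : Prop := d < 0
instance (d : Int) (b : Int) : Decidable (D_fDecimal d b) := by unfold D_fDecimal; infer_instance

def Spec_fDecimal (d : Int) (b : Int) (out : String) : Prop := ¬ D_fDecimal d b → out = fDecimal_alt d b
instance (d : Int) (b : Int) (out : String) : Decidable (Spec_fDecimal d b out) := by unfold Spec_fDecimal; infer_instance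

def pvDiffWitness_fDecimal : Int × Int := (-1, 2)
def pvDiffWitnessOut_fDecimal : String × String := ("1", "")

-- ===== CLAIM (what is proved, stated in full; the proofs are below) =====
def Claim_unchanged_fDecimal : Prop := ∀ (d : Int) (b : Int), Dom_fDecimal d b → Pre_fDecimal d b → Spec_fDecimal d b (fDecimal d b)
def Claim_changed_fDecimal : Prop := Dom_fDecimal (pvDiffWitness_fDecimal.1) (pvDiffWitness_fDecimal.2) ∧ Pre_fDecimal (pvDiffWitness_fDecimal.1) (pvDiffWitness_fDecimal.2) ∧ D_fDecimal (pvDiffWitness_fDecimal.1) (pvDiffWitness_fDecimal.2) ∧ fDecimal (pvDiffWitness_fDecimal.1) (pvDiffWitness_fDecimal.2) = pvDiffWitnessOut_fDecimal.1 ∧ fDecimal_alt (pvDiffWitness_fDecimal.1) (pvDiffWitness_fDecimal.2) = pvDiffWitnessOut_fDecimal.2 ∧ pvDiffWitnessOut_fDecimal.1 ≠ pvDiffWitnessOut_fDecimal.2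
def Claim_exact_fDecimal : Prop := ∀ (d : Int) (b : Int), Dom_fDecimal d b → Pre_fDecimal d b → D_fDecimal d b → fDecimal d b ≠ fDecimal_alt d b

-- ===== LEMMAS AND PROOFS =====

-- T b n = b + b^2 + … + b^n (the count of shorter nonempty numerals)
def pvT (b : Int) : Nat → Int
  | 0 => 0
  | n + 1 => pvT b n + b ^ (n + 1)

theorem pvT_nonneg (b : Int) (hb : 1 ≤ b) (n : Nat) : 0 ≤ pvT b n := by
  induction n with
  | zero => simp [pvT]
  | succ n ih => have := pow_pos (lt_of_lt_of_le one_pos hb) (n + 1); simp [pvT]; omega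

theorem pvT_succ (b : Int) (n : Nat) : pvT b (n + 1) = b * (pvT b n + 1) := by
  induction n with
  | zero => simp [pvT]
  | succ n ih =>
      have e1 : pvT b (n + 1 + 1) = pvT b (n + 1) + b ^ (n + 1 + 1) := rfl
      have e2 : pvT b (n + 1) = pvT b n + b ^ (n + 1) := rfl
      have e3 : b ^ (n + 1 + 1) = b * b ^ (n + 1) := by ring
      rw [e1]; rw [e2] at ih ⊢
      linear_combination ih + e3

theorem pvLoopB_zero (c : List Char) (b : Int) (f : Nat) : pvLoopB c b f 0 = [] := by
  cases f <;> simp [pvLoopB]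

-- K1: the divmod loop started at r + T b n + 1 emits exactly A's n+1 residual digits of r
theorem pvK1 (c : List Char) (b : Int) (hb : 1 ≤ b) :
    ∀ (n : Nat) (r : Int) (f : Nat), 0 ≤ r → r < b ^ (n + 1) → n + 1 ≤ f →
      pvLoopB c b f (r + pvT b n + 1) = pvDigitsA c b (n + 1) r := by
  intro n
  induction n with
  | zero =>
      intro r f hr hlt hf
      obtain ⟨f, rfl⟩ : ∃ f', f = f' + 1 := ⟨f - 1, by omega⟩
      have hb' : (0:Int) < b := by omega
      have hlt' : r < b := by simpa using hlt
      rw [show r + pvT b 0 + 1 = r + 1 from by simp [pvT]]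
      simp only [pvLoopB]
      rw [if_pos (show (0:Int) < r + 1 by omega), show r + 1 - 1 = r from by ring,
        PySem.Int.mod_eq_emod_of_pos hb', PySem.Int.floordiv_eq_ediv_of_pos hb',
        Int.emod_eq_of_lt hr hlt', Int.ediv_eq_zero_of_lt hr hlt', pvLoopB_zero]
      simp only [pvDigitsA, PySem.Int.mod_eq_emod_of_pos hb', Int.emod_eq_of_lt hr hlt']
  | succ n ih =>
      intro r f hr hlt hf
      obtain ⟨f, rfl⟩ : ∃ f', f = f' + 1 := ⟨f - 1, by omega⟩
      have hb' : (0:Int) < b := by omega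
      have hT := pvT_nonneg b hb (n + 1)
      have h1 : (0:Int) < r + pvT b (n + 1) + 1 := by omega
      simp only [pvLoopB, if_pos h1]
      have he : r + pvT b (n + 1) + 1 - 1 = r + b * (pvT b n + 1) := by rw [pvT_succ]; ring
      rw [he, PySem.Int.mod_eq_emod_of_pos hb', PySem.Int.floordiv_eq_ediv_of_pos hb',
        Int.add_mul_emod_self_left, Int.add_mul_ediv_left r _ (by omega)]
      have hdiv0 : r / b + (pvT b n + 1) = r / b + pvT b n + 1 := by ring
      rw [hdiv0, ih (r / b) f (Int.ediv_nonneg hr (by omega))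
        ((Int.ediv_lt_iff_lt_mul hb').2 (by rw [← pow_succ]; exact hlt)) (by omega)]
      simp only [pvDigitsA, PySem.Int.mod_eq_emod_of_pos hb', PySem.Int.floordiv_eq_ediv_of_pos hb']

-- MAIN: relates A's subtractive loop followed by its digit build to the single divmod loop
theorem pvMain (c : List Char) (b : Int) (hb : 1 ≤ b) :
    ∀ (f : Nat) (r : Int) (n : Nat) (g : Nat), 0 ≤ r → r.toNat < f → f + n + 1 ≤ g →
      1 ≤ (pvLoopA b f r ((n : Int) + 1) (b ^ (n + 1))).2 ∧
      pvLoopB c b g (r + pvT b n + 1)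
        = pvDigitsA c b (pvLoopA b f r ((n : Int) + 1) (b ^ (n + 1))).2.toNat
            (pvLoopA b f r ((n : Int) + 1) (b ^ (n + 1))).1 := by
  intro f
  induction f with
  | zero => intro r n g hr hf; omega
  | succ f ih =>
      intro r n g hr hf hg
      have hb' : (0:Int) < b := by omega
      by_cases hle : b ^ (n + 1) ≤ r
      · have hstep : pvLoopA b (f + 1) r ((n : Int) + 1) (b ^ (n + 1))
            = pvLoopA b f (r - b ^ (n + 1)) ((n : Int) + 1 + 1) (b ^ (n + 1) * b) := by
          simp [pvLoopA, hle]
        have hpow : b ^ (n + 1) * b = b ^ (n + 1 + 1) := by rw [← pow_succ]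
        have hpos : (1:Int) ≤ b ^ (n + 1) := one_le_pow₀ hb
        have hcast : ((n : Int) + 1 + 1) = (((n + 1 : Nat) : Int) + 1) := by push_cast; ring
        rw [hstep, hpow, hcast]
        have h2 : (r - b ^ (n + 1)).toNat < f := by omega
        obtain ⟨h1, h2'⟩ := ih (r - b ^ (n + 1)) (n + 1) g (by omega) h2 (by omega)
        refine ⟨h1, ?_⟩
        have harg : r - b ^ (n + 1) + pvT b (n + 1) + 1 = r + pvT b n + 1 := by
          have : pvT b (n + 1) = pvT b n + b ^ (n + 1) := rfl
          rw [this]; ring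
        rw [← harg]; exact h2'
      · have hstop : pvLoopA b (f + 1) r ((n : Int) + 1) (b ^ (n + 1)) = (r, (n : Int) + 1) := by
          simp [pvLoopA, hle]
        rw [hstop]
        refine ⟨by omega, ?_⟩
        have : ((n : Int) + 1).toNat = n + 1 := by omega
        rw [this]
        exact pvK1 c b hb n r g hr (by omega) (by omega)

theorem pvDigitsA_length (c : List Char) (b : Int) (k : Nat) (r : Int) :
    (pvDigitsA c b k r).length = k := by
  induction k generalizing r with
  | zero => rfl
  | succ k ih => simp [pvDigitsA, ih]

theorem pvZfill_noop (cs : List Char) (w : Int) (h : w ≤ (cs.length : Int)) :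
    PySem.Chars.zfill cs w = cs := by
  simp [PySem.Chars.zfill, h]

theorem pvLoopB_nonpos (c : List Char) (b : Int) (m : Int) (hm : m ≤ 0) (f : Nat) :
    pvLoopB c b f m = [] := by
  cases f
  · simp [pvLoopB]
  · simp [pvLoopB]; omega

theorem fDecimal_alt_neg (d b : Int) (hd : d < 0) : fDecimal_alt d b = "" := by
  rw [show fDecimal_alt d b
      = String.ofList ((pvLoopB (pvGChar b) b (d + 2).toNat (d + 1)).reverse) from rfl,
    pvLoopB_nonpos _ _ _ (by omega)]
  rfl

-- ===== VERDICT (by name: the statement is the Claim_ definition above) =====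
theorem fDecimal_spec : Claim_unchanged_fDecimal := by
  intro d b _ hpre hnd
  obtain ⟨hb, _⟩ := hpre
  have hd : 0 ≤ d := by unfold D_fDecimal at hnd; omega
  unfold fDecimal fDecimal_alt
  have hfuel : d.toNat < d.toNat + 1 := Nat.lt_succ_self _
  have hg : (d + 2).toNat = d.toNat + 2 := by omega
  obtain ⟨h1, h2⟩ := pvMain (pvGChar b) b hb (d.toNat + 1) d 0 (d.toNat + 2) hd hfuel (by omega)
  simp only [Nat.cast_zero, zero_add, pow_one] at h1 h2
  set p := pvLoopA b (d.toNat + 1) d 1 b with hp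
  have hne : (p.2 == 0) = false := by
    have : p.2 ≠ 0 := by omega
    simpa using this
  simp only [hne, Bool.false_eq_true, if_false]
  have harg : d + pvT b 0 + 1 = d + 1 := by simp [pvT]
  rw [harg] at h2
  rw [hg, h2]
  congr 1
  apply pvZfill_noop
  rw [List.length_reverse, pvDigitsA_length]
  omega

theorem fDecimal_changed : Claim_changed_fDecimal := by unfold Claim_changed_fDecimal; decide

theorem fDecimal_neg (d b : Int) (hd : d < 0) (hb : 1 ≤ b) :
    fDecimal d b
      = String.ofList (PySem.Chars.zfill ((pvDigitsA (pvGChar b) b 1 d).reverse) 1) := by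
  have ht : d.toNat = 0 := by omega
  simp only [fDecimal, ht]
  simp [pvLoopA, show ¬ (b ≤ d) from by omega]

theorem fDecimal_tight : Claim_exact_fDecimal := by
  intro d b _ hpre hd heq
  obtain ⟨hb, _⟩ := hpre
  unfold D_fDecimal at hd
  rw [fDecimal_alt_neg d b hd, fDecimal_neg d b hd hb,
    pvZfill_noop _ _ (by rw [List.length_reverse, pvDigitsA_length]; omega)] at heq
  have := congrArg String.toList heq
  simp [pvDigitsA] at this
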